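-- pv_equiv track=rewrite | github.com/iu-cewit/survey-analysis | classification/edit_distance.py | edit_distance_phrase
-- ===== SOURCE A (Python) =====
-- def edit_distance(source, target):
--     """Returns the shortest distance to transform source into target.
--
--     str, str -> int"""
--     if source == target:
--         return 0
--     elif len(source) == 0:
--         return len(target)
--     elif len(target) == 0:
--         return len(source)
--     v0 = [None] * (len(target) + 1)
--     v1 = [None] * (len(target) + 1)
--     for i in range(len(v0)):
--         v0[i] = i
--     for i in range(len(source)):
--         v1[0] = i + 1
--         for j in range(len(target)):
--             if source[i] == target[j]:
--                 cost = 0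
--             else:
--                 cost = 1
--             v1[j + 1] = min(v1[j] + 1, v0[j + 1] + 1, v0[j] + cost)
--         for j in range(len(v0)):
--             v0[j] = v1[j]
--     return v1[len(target)]
--
-- def edit_distance_phrase(source, target):
--     """Returns the shortest distance to transform source phrase into target.
--
--     str, str -> int"""
--     source = source.split()
--     target = target.split()
--
--     # remove common words
--     for s_word in source.copy():
--         if s_word in target.copy():
--             source.remove(s_word)
--             target.remove(s_word)
--
--     # calc minimum distance for remaining words
--     distance = []
--     if source == []:
--         return sum([len(word) for word in target])
--     elif target == []:
--         return sum([len(word) for word in source])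
--     else:
--         for s_word in source:
--             edit_dist = []
--             for t_word in target:
--                 edit_dist.append(edit_distance(s_word, t_word))
--             distance.append(sum(edit_dist))
--         return min(distance)
-- ===== SOURCE B (Python) =====
-- def edit_distance(source, target):
--     """Returns the shortest distance to transform source into target.
--
--     str, str -> int"""
--     if source == target:
--         return 0
--     elif len(source) == 0:
--         return len(target)
--     elif len(target) == 0:
--         return len(source)
--     v0 = [None] * (len(target) + 1)
--     v1 = [None] * (len(target) + 1)
--     for i in range(len(v0)):
--         v0[i] = i
--     for i in range(len(source)):
--         v1[0] = i + 1
--         for j in range(len(target)):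
--             if source[i] == target[j]:
--                 cost = 0
--             else:
--                 cost = 1
--             v1[j + 1] = min(v1[j] + 1, v0[j + 1] + 1, v0[j] + cost)
--         for j in range(len(v0)):
--             v0[j] = v1[j]
--     return v1[len(target)]
--
--
-- def edit_distance_phrase(source, target):
--     """Returns the shortest distance to transform source phrase into target.
--
--     str, str -> int"""
--     sw = source.split()
--     tw = target.split()
--
--     # cancel common words by multiset arithmetic instead of repeated remove()
--     cs = {}
--     for w in sw:
--         cs[w] = cs.get(w, 0) + 1
--     ct = {}
--     for w in tw:
--         ct[w] = ct.get(w, 0) + 1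
--     rs = [w for w, c in cs.items() for _ in range(c - min(c, ct.get(w, 0)))]
--     rt = [w for w, c in ct.items() for _ in range(c - min(c, cs.get(w, 0)))]
--
--     if rs == []:
--         return sum(len(w) for w in rt)
--     elif rt == []:
--         return sum(len(w) for w in rs)
--     else:
--         return min(sum(edit_distance(s, t) for t in rt) for s in rs)
-- ===== Notes on version B (the rewrite author's own statement) =====
-- stated objective: idiomatic
-- what changed: The quadratic snapshot-copy removal loop (membership scan plus list.remove per word) is replaced by multiset arithmetic: build word-count dicts for source and target, cancel min counts, and rebuild the remaining word lists from the counters; the edit-distance tail is unchanged.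
import Mathlib
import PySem

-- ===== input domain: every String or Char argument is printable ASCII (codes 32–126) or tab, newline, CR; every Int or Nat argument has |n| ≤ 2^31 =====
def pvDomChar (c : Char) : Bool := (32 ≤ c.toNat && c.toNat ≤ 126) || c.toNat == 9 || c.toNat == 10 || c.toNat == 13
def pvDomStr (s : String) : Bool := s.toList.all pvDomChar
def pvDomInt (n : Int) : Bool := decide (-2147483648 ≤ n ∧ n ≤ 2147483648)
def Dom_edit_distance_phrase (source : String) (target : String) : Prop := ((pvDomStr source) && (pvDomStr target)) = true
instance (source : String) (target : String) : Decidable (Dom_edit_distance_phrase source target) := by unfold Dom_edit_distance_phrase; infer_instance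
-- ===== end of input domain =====

-- B replaces A's quadratic snapshot-copy removal loop by word-count dicts (multiset cancellation); the edit_distance helper is identical in both sources.

-- ===== PORT A =====
-- shared helper: the edit_distance function, textually identical in Source A and Source B
def pvEditDistance (source : String) (target : String) : Int :=
  if source = target then 0
  else if PySem.Str.len source = 0 then (PySem.Str.len target : Int)
  else if PySem.Str.len target = 0 then (PySem.Str.len source : Int)
  else
    let s := source.toList
    let t := target.toList
    -- v0 after the fill loop: v0[i] = i
    let v0 : List Int := (List.range (t.length + 1)).map (fun i => (i : Int))
    -- outer loop over i; v1 is rebuilt each iteration starting from [i+1]; the copy-back loop makes v0 := v1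
    let v0 := (List.range s.length).foldl (fun (v0 : List Int) (i : Nat) =>
      (List.range t.length).foldl (fun (v1 : List Int) (j : Nat) =>
        let cost : Int := if s[i]? = t[j]? then 0 else 1
        v1 ++ [min (min (PySem.List.pyGetD v1 (j : Int) 0 + 1)
                        (PySem.List.pyGetD v0 ((j : Int) + 1) 0 + 1))
                   (PySem.List.pyGetD v0 (j : Int) 0 + cost)]) [(i : Int) + 1]) v0
    PySem.List.pyGetD v0 (t.length : Int) 0

-- one iteration of A's removal loop over source.copy() (remove? always succeeds when it is reached)
def pvStepA (st : List String × List String) (w : String) : List String × List String :=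
  if w ∈ st.2 then
    ((PySem.List.remove? st.1 w).getD st.1, (PySem.List.remove? st.2 w).getD st.2)
  else st

def edit_distance_phrase (source : String) (target : String) : Int :=
  let src0 := PySem.Str.split₀ source
  let tgt0 := PySem.Str.split₀ target
  let st := src0.foldl pvStepA (src0, tgt0)
  let src := st.1
  let tgt := st.2
  if src = [] then (tgt.map (fun w => (PySem.Str.len w : Int))).sum
  else if tgt = [] then (src.map (fun w => (PySem.Str.len w : Int))).sum
  else
    let distance := src.map (fun s_word => (tgt.map (fun t_word => pvEditDistance s_word t_word)).sum)
    (PySem.List.min? distance (fun x => x)).getD 0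

-- ===== PORT B =====
def edit_distance_phrase_alt (source : String) (target : String) : Int :=
  let sw := PySem.Str.split₀ source
  let tw := PySem.Str.split₀ target
  let cs := sw.foldl (fun d w => d.insert w (d.getD w 0 + 1)) (PySem.Dict.empty : PySem.Dict String Int)
  let ct := tw.foldl (fun d w => d.insert w (d.getD w 0 + 1)) (PySem.Dict.empty : PySem.Dict String Int)
  let rs := cs.items.flatMap (fun p => List.replicate (p.2 - min p.2 (ct.getD p.1 0)).toNat p.1)
  let rt := ct.items.flatMap (fun p => List.replicate (p.2 - min p.2 (cs.getD p.1 0)).toNat p.1)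
  if rs = [] then (rt.map (fun w => (PySem.Str.len w : Int))).sum
  else if rt = [] then (rs.map (fun w => (PySem.Str.len w : Int))).sum
  else
    (PySem.List.min? (rs.map (fun s => (rt.map (fun t => pvEditDistance s t)).sum)) (fun x => x)).getD 0

-- ===== PRECONDITION & SPEC =====
def Spec_edit_distance_phrase (source : String) (target : String) (out : Int) : Prop := out = edit_distance_phrase_alt source target
instance (source : String) (target : String) (out : Int) : Decidable (Spec_edit_distance_phrase source target out) := by unfold Spec_edit_distance_phrase; infer_instance

-- ===== CLAIM (what is proved, stated in full; the proofs are below) =====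
def Claim_equal_edit_distance_phrase : Prop := ∀ (source : String) (target : String), Dom_edit_distance_phrase source target → Spec_edit_distance_phrase source target (edit_distance_phrase source target)

-- ===== LEMMAS AND PROOFS =====

-- counts after A's removal loop: each processed word of ws cancels one copy from T (and the processed
-- copy from S) while T still holds one; the hypothesis says ws never holds more copies than S does.
lemma countsA (ws : List String) : ∀ (S T : List String),
    (∀ w, ws.count w ≤ S.count w) →
    ∀ w, (ws.foldl pvStepA (S, T)).1.count w = S.count w - min (T.count w) (ws.count w)
       ∧ (ws.foldl pvStepA (S, T)).2.count w = T.count w - min (T.count w) (ws.count w) := by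
  induction ws with
  | nil => intro S T _ w; simp
  | cons v ws ih =>
    intro S T h w
    simp only [List.foldl_cons]
    by_cases hv : v ∈ T
    · have hvS : v ∈ S := by
        have := h v
        simp at this
        exact List.count_pos_iff.mp (by omega)
      have hstep : pvStepA (S, T) v = (S.erase v, T.erase v) := by
        simp [pvStepA, hv, PySem.List.remove?_eq_some_erase S v hvS, PySem.List.remove?_eq_some_erase T v hv]
      rw [hstep]
      have h' : ∀ u, ws.count u ≤ (S.erase v).count u := by
        intro u
        have hu := h u
        rw [List.count_erase]
        rw [List.count_cons] at hu
        by_cases huv : v = u <;> simp [huv] at hu ⊢ <;> omega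
      obtain ⟨h1, h2⟩ := ih (S.erase v) (T.erase v) h' w
      have hTv : 0 < T.count v := List.count_pos_iff.mpr hv
      have hSv : 0 < S.count v := List.count_pos_iff.mpr hvS
      simp only [h1, h2, List.count_erase, List.count_cons]
      rcases eq_or_ne v w with rfl | huv
      · simp; constructor <;> omega
      · simp [huv]
    · have hstep : pvStepA (S, T) v = (S, T) := by simp [pvStepA, hv]
      rw [hstep]
      have h' : ∀ u, ws.count u ≤ S.count u := by
        intro u
        have hu := h u
        rw [List.count_cons] at hu
        omega
      obtain ⟨h1, h2⟩ := ih S T h' w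
      have hTv : T.count v = 0 := List.count_eq_zero.mpr hv
      simp only [h1, h2, List.count_cons]
      rcases eq_or_ne v w with rfl | huv
      · simp; constructor <;> omega
      · simp [huv]

-- count of w in a flatMap of replicates over a duplicate-free key list
lemma count_flatMap_replicate (l : List String) (f : String → Nat) (w : String)
    (hnd : l.Nodup) :
    (l.flatMap (fun k => List.replicate (f k) k)).count w
      = if w ∈ l then f w else 0 := by
  induction l with
  | nil => simp
  | cons k l ih =>
    simp only [List.flatMap_cons, List.count_append, List.count_replicate]
    have hnd' := hnd.of_cons
    have hk : k ∉ l := (List.nodup_cons.mp hnd).1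
    rcases eq_or_ne k w with rfl | hkw
    · simp [ih hnd', hk]
    · simp [hkw, ih hnd', Ne.symm hkw]

-- count of w in B's rebuilt remainder list
lemma countB (xs ys : List String) (w : String) :
    ((PySem.Dict.counter xs).items.flatMap
      (fun p => List.replicate (p.2 - min p.2 ((PySem.Dict.counter ys).getD p.1 0)).toNat p.1)).count w
    = xs.count w - min (xs.count w) (ys.count w) := by
  rw [PySem.Dict.items_counter, List.flatMap_map]
  have hfun : (fun a : String =>
      List.replicate ((((a, (List.count a xs : Int)).2) - min ((a, (List.count a xs : Int)).2) ((PySem.Dict.counter ys).getD ((a, (List.count a xs : Int)).1) 0)).toNat) ((a, (List.count a xs : Int)).1))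
      = fun k : String => List.replicate (xs.count k - min (xs.count k) (ys.count k)) k := by
    funext k
    simp only [PySem.Dict.getD_counter]
    congr 1
    omega
  rw [hfun, count_flatMap_replicate _ _ _ (PySem.Set.nodup_ofList xs)]
  rcases (em (w ∈ xs)) with hw | hw
  · simp [PySem.Set.mem_ofList, hw]
  · simp [PySem.Set.mem_ofList, hw, List.count_eq_zero.mpr hw]

-- min(xs) (no key) takes the same value on permuted lists
lemma min_getD_perm (l1 l2 : List Int) (hp : l1.Perm l2) :
    (PySem.List.min? l1 (fun x => x)).getD 0 = (PySem.List.min? l2 (fun x => x)).getD 0 := by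
  rcases eq_or_ne l1 [] with rfl | hne
  · rw [hp.symm.eq_nil]
  · have hne2 : l2 ≠ [] := fun h => hne ((h ▸ hp).eq_nil)
    obtain ⟨m1, hm1⟩ : ∃ m, PySem.List.min? l1 (fun x => x) = some m := by
      cases h : PySem.List.min? l1 (fun x => x) with
      | none => exact absurd ((PySem.List.min?_eq_none_iff _ _).mp h) hne
      | some m => exact ⟨m, rfl⟩
    obtain ⟨m2, hm2⟩ : ∃ m, PySem.List.min? l2 (fun x => x) = some m := by
      cases h : PySem.List.min? l2 (fun x => x) with
      | none => exact absurd ((PySem.List.min?_eq_none_iff _ _).mp h) hne2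
      | some m => exact ⟨m, rfl⟩
    rw [hm1, hm2]
    have h12 : m2 ≤ m1 := PySem.List.min?_isMin hm2 m1 (hp.mem_iff.mp (PySem.List.min?_mem hm1))
    have h21 : m1 ≤ m2 := PySem.List.min?_isMin hm1 m2 (hp.symm.mem_iff.mp (PySem.List.min?_mem hm2))
    simp [le_antisymm h21 h12]

-- the common tail of both programs is invariant under permutations of the two word lists
lemma tail_congr (s1 t1 s2 t2 : List String) (hs : s1.Perm s2) (ht : t1.Perm t2) :
    (if s1 = [] then (t1.map (fun w => (PySem.Str.len w : Int))).sum
     else if t1 = [] then (s1.map (fun w => (PySem.Str.len w : Int))).sum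
     else (PySem.List.min? (s1.map (fun s => (t1.map (fun t => pvEditDistance s t)).sum)) (fun x => x)).getD 0)
  = (if s2 = [] then (t2.map (fun w => (PySem.Str.len w : Int))).sum
     else if t2 = [] then (s2.map (fun w => (PySem.Str.len w : Int))).sum
     else (PySem.List.min? (s2.map (fun s => (t2.map (fun t => pvEditDistance s t)).sum)) (fun x => x)).getD 0) := by
  by_cases h1 : s1 = []
  · have h2 : s2 = [] := by rw [h1] at hs; exact hs.symm.eq_nil
    simp only [h1, h2]
    exact (ht.map _).sum_eq
  · have h2 : s2 ≠ [] := fun h => h1 (by rw [h] at hs; exact hs.eq_nil)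
    rw [if_neg h1, if_neg h2]
    by_cases h3 : t1 = []
    · have h4 : t2 = [] := by rw [h3] at ht; exact ht.symm.eq_nil
      rw [if_pos h3, if_pos h4]
      exact (hs.map _).sum_eq
    · have h4 : t2 ≠ [] := fun h => h3 (by rw [h] at ht; exact ht.eq_nil)
      rw [if_neg h3, if_neg h4]
      have hinner : ∀ s, (t1.map (fun t => pvEditDistance s t)).sum = (t2.map (fun t => pvEditDistance s t)).sum :=
        fun s => (ht.map _).sum_eq
      rw [List.map_congr_left (fun s _ => hinner s)]
      exact min_getD_perm _ _ (hs.map _)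

-- ===== VERDICT (by name: the statement is the Claim_ definition above) =====
theorem edit_distance_phrase_spec : Claim_equal_edit_distance_phrase := by
  intro source target _
  unfold Spec_edit_distance_phrase edit_distance_phrase edit_distance_phrase_alt
  simp only [PySem.Dict.foldl_insert_getD_add_one_eq_counter]
  have hA := countsA (PySem.Str.split₀ source) (PySem.Str.split₀ source) (PySem.Str.split₀ target)
    (fun _ => le_refl _)
  have hs : ((PySem.Str.split₀ source).foldl pvStepA (PySem.Str.split₀ source, PySem.Str.split₀ target)).1.Perm
      ((PySem.Dict.counter (PySem.Str.split₀ source)).items.flatMap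
        (fun p => List.replicate (p.2 - min p.2 ((PySem.Dict.counter (PySem.Str.split₀ target)).getD p.1 0)).toNat p.1)) := by
    apply List.perm_iff_count.mpr
    intro a
    rw [(hA a).1, countB]
    omega
  have ht : ((PySem.Str.split₀ source).foldl pvStepA (PySem.Str.split₀ source, PySem.Str.split₀ target)).2.Perm
      ((PySem.Dict.counter (PySem.Str.split₀ target)).items.flatMap
        (fun p => List.replicate (p.2 - min p.2 ((PySem.Dict.counter (PySem.Str.split₀ source)).getD p.1 0)).toNat p.1)) := by
    apply List.perm_iff_count.mpr
    intro a
    rw [(hA a).2, countB]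
  exact tail_congr _ _ _ _ hs ht
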